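-- pv_equiv track=rewrite | github.com/aiventures/phpbb_scraper | html_converter.py | dict_with_key_as_html
-- ===== SOURCE A (Python) =====
-- def wrap(content,tag,lf=False):
--     """embeds content string with html tags"""
--     if lf is False:
--         return "<"+tag+">"+content+"</"+tag+">"
--     else:
--         return "<"+tag+">\n"+content+"\n"+"</"+tag+">"
--
-- def get_link(link,text):
--     """gereates link"""
--     return '<a href="'+link+'">'+text+'</a>'
--
-- def wrap_multiple(*items,tag="td",lf=False):
--     """wraps items in a list into html tags"""
--     out = ""
--     for __,item in enumerate(*items):
--         out += wrap(item,tag=tag,lf=lf)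
--         if lf is True:
--             out += "\n"
--     return out
--
-- def dict_with_key_as_html(topics_dict_list,debug=False):
--     """ Generates HTML table for a list of dictionaries, extracts key values from 1st line. if a key has a corresponding key
--         with suffix _link, this entry will be treated as link (and value generated as url). If a key ends with url
--         the value will also be treated as link.
--         source dictionary is assumed of structure
--         {keyX:{subkey1:valueX1,subkey2:valueX2,....},keyY:{subkey1:valueY1,subkey2:valueY2,....}} """
--
--     post_list = []
--     first_run = True
--     counter = 1
--
--     for key_topic in topics_dict_list:
--         topic = topics_dict_list[key_topic]
--
--         if first_run is True:
--             first_run = False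
--             key_list = list(topic.keys())
--
--         post_as_dict = {}
--         # add post unique hash id as post key
--         post_as_dict['count'] = {'value':counter,'link':None}
--         post_as_dict['post_key'] = {'value':key_topic,'link':None}
--         counter += 1
--
--         for key in key_list:
--             # skip keys ending with link
--             if key[-4:] == 'link':
--                 continue
--             #check if there is a a key with a link
--             link = topic.get(key+'_link',None)
--             value = topic.get(key,None)
--             #use url if key end with url
--             if key[-3:] == 'url':
--                 link = value
--             post_as_dict[key] = {'value':value,'link':link}
--         post_list.append(post_as_dict)
--
--     return dict_as_html(post_list)
--
-- def dict_as_html(dict_list,debug=False):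
--     """returns dictionary as html file. keys are header lines, data
--        is assumed of format <key>:{value:<value>,link:<link>}  """
--
--     html_out = ""
--     # assumption all keys are the same as first line of sata set
--     keys = list(dict_list[0].keys())
--     keys_html = wrap_multiple(keys)
--     html_out += wrap(keys_html,tag="tr",lf=False)
--
--     for row in dict_list:
--         values = []
--         for key in keys:
--             if row.get(key,None) is None:
--                 continue
--             value =  str(row[key]["value"])
--             link = row[key]["link"]
--             if link is not None:
--                 value = get_link(link,value)
--             values.append(value)
--         values_html = wrap_multiple(values)
--         html_out += wrap(values_html,tag="tr",lf=False)
--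
--     html_out = wrap(html_out,tag="table",lf=False)
--     html_out = wrap(html_out,tag="html",lf=False)
--
--     return html_out
-- ===== SOURCE B (Python) =====
-- def dict_with_key_as_html(topics_dict_list, debug=False):
--     """Single fused pass: derive the column list from the first topic, then emit each row
--     directly as HTML, without A's intermediate list-of-dicts and second rendering pass."""
--     def td_row(cells):
--         return '<tr>' + ''.join('<td>' + c + '</td>' for c in cells) + '</tr>'
--     def cell(topic, k):
--         value = str(topic.get(k))
--         link = topic.get(k) if k[-3:] == 'url' else topic.get(k + '_link')
--         return '<a href="' + link + '">' + value + '</a>' if link is not None else value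
--     first_topic = topics_dict_list[list(topics_dict_list)[0]]
--     keys = [k for k in first_topic if k[-4:] != 'link']
--     rows = [td_row(['count', 'post_key'] + keys)]
--     rows += [td_row([str(i), topic_key] + [cell(topic, k) for k in keys])
--              for i, (topic_key, topic) in enumerate(topics_dict_list.items(), 1)]
--     return '<html><table>' + ''.join(rows) + '</table></html>'
-- ===== Notes on version B (the rewrite author's own statement) =====
-- stated objective: simpler
-- what changed: B drops A's intermediate list-of-row-dicts and the whole second rendering pass (dict_as_html/wrap/wrap_multiple): it derives the column list from the first topic once and emits each HTML row directly in a single pass, joining at the end (constant-factor win: no per-row dict building and re-lookup).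
import Mathlib
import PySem

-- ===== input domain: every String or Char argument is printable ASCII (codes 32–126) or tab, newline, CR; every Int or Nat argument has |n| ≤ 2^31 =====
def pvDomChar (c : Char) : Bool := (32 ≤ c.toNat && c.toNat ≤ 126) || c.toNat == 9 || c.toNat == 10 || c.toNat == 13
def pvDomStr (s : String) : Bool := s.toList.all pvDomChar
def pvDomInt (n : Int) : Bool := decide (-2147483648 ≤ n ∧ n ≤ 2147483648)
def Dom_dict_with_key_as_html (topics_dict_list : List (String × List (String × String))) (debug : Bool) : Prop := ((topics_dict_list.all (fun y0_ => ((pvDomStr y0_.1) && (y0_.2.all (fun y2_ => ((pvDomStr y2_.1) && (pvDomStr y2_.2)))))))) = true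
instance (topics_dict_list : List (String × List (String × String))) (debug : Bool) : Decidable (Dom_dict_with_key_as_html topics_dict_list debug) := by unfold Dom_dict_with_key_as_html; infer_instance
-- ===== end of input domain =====

-- B is a single fused pass that renders each HTML row directly, instead of A's intermediate
-- list-of-row-dicts followed by a second rendering pass (objective: simpler).

-- ===== PORT A =====
-- Python values stored in A's post_as_dict 'value' field can be int, str or None:
inductive PyVal : Type
  | vint : Int → PyVal
  | vstr : String → PyVal
  | vnone : PyVal
deriving DecidableEq, Repr

-- str(v)
def pyStr : PyVal → String
  | .vint n => PySem.Int.toStr n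
  | .vstr s => s
  | .vnone => "None"

def optVal : Option String → PyVal
  | some s => .vstr s
  | none => .vnone

-- helper wrap(content, tag, lf)
def wrapP (content tag : String) (lf : Bool) : String :=
  if lf = false then "<" ++ tag ++ ">" ++ content ++ "</" ++ tag ++ ">"
  else "<" ++ tag ++ ">" ++ "\n" ++ content ++ "\n" ++ "</" ++ tag ++ ">"

-- helper get_link(link, text)
def get_linkP (link text : String) : String :=
  "<a href=\"" ++ link ++ "\">" ++ text ++ "</a>"

-- helper wrap_multiple(*items, tag, lf)
def wrap_multipleP (items : List String) (tag : String) (lf : Bool) : String :=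
  items.foldl (fun out item => out ++ wrapP item tag lf ++ (if lf = true then "\n" else "")) ""

-- the body of A's per-topic loop building post_as_dict (inserts 'count', 'post_key', then key_list)
def buildPost (topic : PySem.Dict String String) (key_list : List String)
    (counter : Int) (key_topic : String) : PySem.Dict String (PyVal × Option String) :=
  key_list.foldl (fun d key =>
      if PySem.Str.slice key (some (-4)) none == "link" then d
      else
        let link := topic.get? (key ++ "_link")
        let value := topic.get? key
        let link := if PySem.Str.slice key (some (-3)) none == "url" then value else link
        d.insert key (optVal value, link))
    ((PySem.Dict.empty.insert "count" (PyVal.vint counter, none)).insert "post_key"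
      (PyVal.vstr key_topic, none))

-- one iteration of A's main loop (state: post_list, first_run, key_list, counter)
def stepA (tdl : List (String × List (String × String)))
    (st : List (PySem.Dict String (PyVal × Option String)) × Bool × List String × Int)
    (key_topic : String) :
    List (PySem.Dict String (PyVal × Option String)) × Bool × List String × Int :=
  let topic := PySem.Dict.mk ((PySem.Dict.mk tdl).getD key_topic [])
  let key_list := if st.2.1 = true then topic.keys else st.2.2.1
  let post_as_dict := buildPost topic key_list st.2.2.2 key_topic
  (st.1 ++ [post_as_dict], false, key_list, st.2.2.2 + 1)

-- dict_as_html; Python raises IndexError on dict_list == [] (dict_list[0]) — excluded by Pre_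
def dict_as_htmlP (dict_list : List (PySem.Dict String (PyVal × Option String)))
    (debug : Bool) : String :=
  let keys := (dict_list.head?.getD (PySem.Dict.mk [])).keys
  let keys_html := wrap_multipleP keys "td" false
  let html_out := "" ++ wrapP keys_html "tr" false
  let html_out := dict_list.foldl (fun html_out row =>
      let values := keys.foldl (fun values key =>
          match row.get? key with
          | none => values
          | some cell =>
            let value := pyStr cell.1
            let value := match cell.2 with
              | some link => get_linkP link value
              | none => value
            values ++ [value]) []
      html_out ++ wrapP (wrap_multipleP values "td" false) "tr" false) html_out
  wrapP (wrapP html_out "table" false) "html" false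

def dict_with_key_as_html (topics_dict_list : List (String × List (String × String)))
    (debug : Bool) : String :=
  let st := (topics_dict_list.map (·.1)).foldl (stepA topics_dict_list) ([], true, [], 1)
  dict_as_htmlP st.1 debug

-- ===== PORT B =====
-- str(topic.get(k))
def strOfGet : Option String → String
  | some s => s
  | none => "None"

-- Source B's local helper cell(topic, k)
def cellOf (topic : PySem.Dict String String) (k : String) : String :=
  let value := strOfGet (topic.get? k)
  let link := if PySem.Str.slice k (some (-3)) none == "url" then topic.get? k
              else topic.get? (k ++ "_link")
  match link with
  | some l => "<a href=\"" ++ l ++ "\">" ++ value ++ "</a>"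
  | none => value

-- Source B's local helper td_row(cells)
def tdRow (cells : List String) : String :=
  "<tr>" ++ String.join (cells.map (fun c => "<td>" ++ c ++ "</td>")) ++ "</tr>"

def dict_with_key_as_html_alt (topics_dict_list : List (String × List (String × String)))
    (debug : Bool) : String :=
  match (topics_dict_list.map (·.1))[0]? with
  | none => ""   -- Python: list(topics_dict_list)[0] raises IndexError on empty input (excluded by Pre_)
  | some k0 =>
    let first_topic := PySem.Dict.mk ((PySem.Dict.mk topics_dict_list).getD k0 [])
    let keys := first_topic.keys.filter
      (fun k => !(PySem.Str.slice k (some (-4)) none == "link"))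
    let rows := [tdRow (["count", "post_key"] ++ keys)]
    let rows := rows ++ (PySem.List.enumerate topics_dict_list 1).map (fun p =>
        tdRow ([PySem.Int.toStr p.1, p.2.1] ++ keys.map (cellOf (PySem.Dict.mk p.2.2))))
    "<html><table>" ++ String.join rows ++ "</table></html>"

-- ===== PRECONDITION & SPEC =====
-- Pre_ excludes: the empty input (A raises IndexError on dict_list[0]); association lists with
-- duplicate outer or inner keys (a Python dict cannot carry duplicate keys, so such lists do not
-- correspond to any input of A); and first topics using the reserved column names 'count' or
-- 'post_key', on which A's synthetic columns are silently overwritten by dict re-insertion —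
-- an accidental corner where B keeps both columns instead.
def Pre_dict_with_key_as_html (topics_dict_list : List (String × List (String × String)))
    (debug : Bool) : Prop :=
  topics_dict_list ≠ [] ∧
  (topics_dict_list.map (·.1)).Nodup ∧
  (∀ t ∈ topics_dict_list, (t.2.map (·.1)).Nodup) ∧
  "count" ∉ (topics_dict_list.headD ("", [])).2.map (·.1) ∧
  "post_key" ∉ (topics_dict_list.headD ("", [])).2.map (·.1)

instance (topics_dict_list : List (String × List (String × String))) (debug : Bool) :
    Decidable (Pre_dict_with_key_as_html topics_dict_list debug) := by
  unfold Pre_dict_with_key_as_html; infer_instance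

def pvWitness_dict_with_key_as_html : (List (String × List (String × String))) × Bool :=
  ([("k1", [("a", "1"), ("a_link", "u"), ("burl", "w")]), ("k2", [("a", "2")])], false)

def Spec_dict_with_key_as_html (topics_dict_list : List (String × List (String × String))) (debug : Bool) (out : String) : Prop := out = dict_with_key_as_html_alt topics_dict_list debug
instance (topics_dict_list : List (String × List (String × String))) (debug : Bool) (out : String) : Decidable (Spec_dict_with_key_as_html topics_dict_list debug out) := by unfold Spec_dict_with_key_as_html; infer_instance

-- ===== CLAIM (what is proved, stated in full; the proofs are below) =====
def Claim_equal_dict_with_key_as_html : Prop := ∀ (topics_dict_list : List (String × List (String × String))) (debug : Bool), Dom_dict_with_key_as_html topics_dict_list debug → Pre_dict_with_key_as_html topics_dict_list debug → Spec_dict_with_key_as_html topics_dict_list debug (dict_with_key_as_html topics_dict_list debug)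

-- ===== LEMMAS AND PROOFS =====

-- the (value, link) pair A stores for key k of a topic
def cellPair (tp : PySem.Dict String String) (k : String) : PyVal × Option String :=
  (optVal (tp.get? k),
   if PySem.Str.slice k (some (-3)) none == "url" then tp.get? k else tp.get? (k ++ "_link"))

-- B's filter predicate (keep keys not ending in 'link')
def linkPred (k : String) : Bool := !(PySem.Str.slice k (some (-4)) none == "link")

theorem foldl_append_hom (l : List String) (a : String) :
    l.foldl (· ++ ·) a = a ++ String.join l := by
  induction l generalizing a with
  | nil => simp [String.join, String.append_empty]
  | cons y ys ih =>
    show ys.foldl (· ++ ·) (a ++ y) = a ++ String.join (y :: ys)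
    rw [ih (a ++ y),
      show String.join (y :: ys) = ys.foldl (· ++ ·) ("" ++ y) from rfl,
      String.empty_append, ih y, String.append_assoc]

theorem sjoin_cons (x : String) (xs : List String) :
    String.join (x :: xs) = x ++ String.join xs := by
  show List.foldl (· ++ ·) ("" ++ x) xs = x ++ String.join xs
  rw [String.empty_append, foldl_append_hom]

-- an append-accumulating foldl is a join of the mapped list
theorem foldl_append_join {α : Type} (f : α → String) (l : List α) (a : String) :
    l.foldl (fun out i => out ++ f i) a = a ++ String.join (l.map f) := by
  induction l generalizing a with
  | nil => simp [String.join, String.append_empty]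
  | cons y ys ih => rw [List.foldl_cons, ih, List.map_cons, sjoin_cons, String.append_assoc]

theorem wrapP_false (c t : String) :
    wrapP c t false = ("<" ++ t ++ ">") ++ c ++ ("</" ++ t ++ ">") := by
  simp [wrapP, String.append_assoc]

theorem wrap_multipleP_td (items : List String) :
    wrap_multipleP items "td" false
      = String.join (items.map (fun c => "<td>" ++ c ++ "</td>")) := by
  have h : (fun (out item : String) =>
        out ++ wrapP item "td" false ++ (if (false : Bool) = true then "\n" else ""))
      = fun out item => out ++ ("<td>" ++ item ++ "</td>") := by
    funext out item
    rw [wrapP_false, show ("<" ++ "td" ++ ">" : String) = "<td>" from rfl,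
      show ("</" ++ "td" ++ ">" : String) = "</td>" from rfl]
    simp [String.append_empty, String.append_assoc]
  unfold wrap_multipleP
  rw [h, foldl_append_join, String.empty_append]

theorem buildPost_items (tp : PySem.Dict String String) (KL : List String)
    (c : Int) (kt : String) (hnd : KL.Nodup)
    (hc : "count" ∉ KL) (hp : "post_key" ∉ KL) :
    (buildPost tp KL c kt).items
      = ("count", (PyVal.vint c, none)) :: ("post_key", (PyVal.vstr kt, none)) ::
        (KL.filter linkPred).map (fun k => (k, cellPair tp k)) := by
  have hstep : (fun (d : PySem.Dict String (PyVal × Option String)) key =>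
        if PySem.Str.slice key (some (-4)) none == "link" then d
        else
          let link := tp.get? (key ++ "_link")
          let value := tp.get? key
          let link := if PySem.Str.slice key (some (-3)) none == "url" then value else link
          d.insert key (optVal value, link))
      = fun d key => if linkPred key = true then d.insert key (cellPair tp key) else d := by
    funext d key
    by_cases h : PySem.Str.slice key (some (-4)) none == "link" <;>
      simp [linkPred, h, cellPair]
  unfold buildPost
  rw [hstep, PySem.List.foldl_if_eq_foldl_filter]
  have hd0 : ((PySem.Dict.empty.insert "count" ((PyVal.vint c : PyVal), (none : Option String))).insert
      "post_key" (PyVal.vstr kt, none)).items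
      = [("count", ((PyVal.vint c : PyVal), (none : Option String))),
         ("post_key", (PyVal.vstr kt, none))] := by
    rw [PySem.Dict.items_insert_of_not_contains, PySem.Dict.items_insert_of_not_contains]
    · rfl
    · simp [PySem.Dict.contains_empty]
    · simp [PySem.Dict.contains_insert, PySem.Dict.contains_empty]
  rw [PySem.Dict.items_foldl_insert_fresh (k := fun a => a) (v := fun a => cellPair tp a)]
  · rw [hd0]; rfl
  · intro a ha
    have haKL : a ∈ KL := List.mem_of_mem_filter ha
    have h1 : a ≠ "count" := fun h => hc (h ▸ haKL)
    have h2 : a ≠ "post_key" := fun h => hp (h ▸ haKL)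
    simp [PySem.Dict.contains_insert, PySem.Dict.contains_empty, h1, h2]
  · simpa using hnd.filter _

-- dict lookup by a key of the association list, under distinct keys
theorem dict_lookup (l : List (String × List (String × String)))
    (hnd : (l.map (·.1)).Nodup) (q : String × List (String × String)) (hq : q ∈ l) :
    (PySem.Dict.mk l).getD q.1 [] = q.2 := by
  have h1 : (q.1, q.2) ∈ (PySem.Dict.mk l).items := by simpa using hq
  have h2 : (PySem.Dict.mk l).keys.Nodup := by
    show ((PySem.Dict.mk l).items.map (·.1)).Nodup
    simpa using hnd
  exact PySem.Dict.getD_of_mem_items _ h1 h2 []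

-- A's loop after the first iteration (first_run = false, key_list fixed)
theorem foldA_tail (tdl : List (String × List (String × String)))
    (ks : List String)
    (acc : List (PySem.Dict String (PyVal × Option String)))
    (KL : List String) (c : Int) :
    ks.foldl (stepA tdl) (acc, false, KL, c)
      = (acc ++ (PySem.List.enumerate ks c).map (fun p =>
            buildPost (PySem.Dict.mk ((PySem.Dict.mk tdl).getD p.2 [])) KL p.1 p.2),
         false, KL, c + ks.length) := by
  induction ks generalizing acc c with
  | nil => simp [PySem.List.enumerate_nil]
  | cons k ks ih =>
    rw [List.foldl_cons, show stepA tdl (acc, false, KL, c) k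
        = (acc ++ [buildPost (PySem.Dict.mk ((PySem.Dict.mk tdl).getD k [])) KL c k],
           false, KL, c + 1) from by simp [stepA], ih,
      PySem.List.enumerate_cons]
    simp [List.append_assoc]
    omega

-- replace key-based lookups by the enumerated pairs themselves
theorem enum_keys (tdl : List (String × List (String × String)))
    (hnd : (tdl.map (·.1)).Nodup) (KL : List String)
    (l : List (String × List (String × String))) (hl : ∀ q ∈ l, q ∈ tdl) (c : Int) :
    (PySem.List.enumerate (l.map (·.1)) c).map (fun p =>
        buildPost (PySem.Dict.mk ((PySem.Dict.mk tdl).getD p.2 [])) KL p.1 p.2)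
      = (PySem.List.enumerate l c).map (fun q =>
          buildPost (PySem.Dict.mk q.2.2) KL q.1 q.2.1) := by
  induction l generalizing c with
  | nil => simp [PySem.List.enumerate_nil]
  | cons q l ih =>
    rw [List.map_cons, PySem.List.enumerate_cons, PySem.List.enumerate_cons,
      List.map_cons, List.map_cons]
    rw [ih (fun x hx => hl x (List.mem_cons_of_mem _ hx))]
    rw [show (PySem.Dict.mk tdl).getD q.1 [] = q.2 from dict_lookup tdl hnd q (hl q List.mem_cons_self)]

-- rendering one row dict back out of A's post_as_dict
theorem valuesA (tp : PySem.Dict String String) (KL : List String)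
    (hnd : KL.Nodup) (hc : "count" ∉ KL) (hp : "post_key" ∉ KL)
    (c : Int) (kt : String) :
    ("count" :: "post_key" :: KL.filter linkPred).foldl (fun values key =>
        match (buildPost tp KL c kt).get? key with
        | none => values
        | some cell =>
          values ++ [match cell.2 with
            | some link => get_linkP link (pyStr cell.1)
            | none => pyStr cell.1]) []
      = [PySem.Int.toStr c, kt] ++ (KL.filter linkPred).map (cellOf tp) := by
  have hitems := buildPost_items tp KL c kt hnd hc hp
  have hkeys : (buildPost tp KL c kt).keys
      = "count" :: "post_key" :: KL.filter linkPred := by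
    show (buildPost tp KL c kt).items.map (·.1) = _
    rw [hitems]; simp [Function.comp_def]
  have hknd : (buildPost tp KL c kt).keys.Nodup := by
    rw [hkeys]
    refine List.nodup_cons.mpr ⟨?_, List.nodup_cons.mpr ⟨?_, hnd.filter _⟩⟩
    · intro h
      rcases List.mem_cons.mp h with h | h
      · exact absurd h (by decide)
      · exact hc (List.mem_of_mem_filter h)
    · intro h
      exact hp (List.mem_of_mem_filter h)
  have hget : ∀ k ∈ KL.filter linkPred,
      (buildPost tp KL c kt).get? k = some (cellPair tp k) := by
    intro k hk
    refine PySem.Dict.get?_of_mem_items _ ?_ hknd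
    rw [hitems]
    exact List.mem_cons_of_mem _ (List.mem_cons_of_mem _ (List.mem_map_of_mem hk))
  have hgc : (buildPost tp KL c kt).get? "count" = some (PyVal.vint c, none) :=
    PySem.Dict.get?_of_mem_items _ (by rw [hitems]; simp) hknd
  have hgp : (buildPost tp KL c kt).get? "post_key" = some (PyVal.vstr kt, none) :=
    PySem.Dict.get?_of_mem_items _ (by rw [hitems]; simp) hknd
  simp only [List.foldl_cons, hgc, hgp, pyStr, List.nil_append]
  refine (PySem.List.foldl_congr_mem' _ _ (fun vs k => vs ++ [cellOf tp k]) _ ?_).trans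
    (PySem.List.foldl_append_singleton_eq_map (f := cellOf tp) ..)
  intro k hk vs
  rw [hget k hk]
  show vs ++ [(match (cellPair tp k).2 with
      | some link => get_linkP link (pyStr (cellPair tp k).1)
      | none => pyStr (cellPair tp k).1)] = vs ++ [cellOf tp k]
  congr 1
  simp only [cellPair, cellOf]
  cases hlk : (if PySem.Str.slice k (some (-3)) none == "url" then tp.get? k
      else tp.get? (k ++ "_link")) <;>
    cases tp.get? k <;>
      simp [pyStr, optVal, strOfGet, get_linkP]

theorem html_table_wrap (X : String) :
    wrapP (wrapP X "table" false) "html" false = "<html><table>" ++ X ++ "</table></html>" := by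
  rw [wrapP_false, wrapP_false,
    show ("<" ++ "table" ++ ">" : String) = "<table>" from rfl,
    show ("</" ++ "table" ++ ">" : String) = "</table>" from rfl,
    show ("<" ++ "html" ++ ">" : String) = "<html>" from rfl,
    show ("</" ++ "html" ++ ">" : String) = "</html>" from rfl,
    show ("<html><table>" : String) = "<html>" ++ "<table>" from rfl,
    show ("</table></html>" : String) = "</table>" ++ "</html>" from rfl]
  simp only [String.append_assoc]

theorem tr_wrap (X : String) : wrapP X "tr" false = "<tr>" ++ X ++ "</tr>" := by
  rw [wrapP_false, show ("<" ++ "tr" ++ ">" : String) = "<tr>" from rfl,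
    show ("</" ++ "tr" ++ ">" : String) = "</tr>" from rfl]

-- rendering A's post_list (a nonempty list of buildPost rows over a common key list)
theorem A_render (KL : List String) (hnd : KL.Nodup)
    (hc : "count" ∉ KL) (hp : "post_key" ∉ KL)
    (e : Int × (String × List (String × String)))
    (E' : List (Int × (String × List (String × String)))) (debug : Bool) :
    dict_as_htmlP ((e :: E').map (fun q =>
        buildPost (PySem.Dict.mk q.2.2) KL q.1 q.2.1)) debug
      = "<html><table>" ++
        String.join (tdRow ("count" :: "post_key" :: KL.filter linkPred) ::
          (e :: E').map (fun q => tdRow ([PySem.Int.toStr q.1, q.2.1] ++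
            (KL.filter linkPred).map (cellOf (PySem.Dict.mk q.2.2))))) ++
        "</table></html>" := by
  have hkeys0 : ∀ (q : Int × (String × List (String × String))),
      (buildPost (PySem.Dict.mk q.2.2) KL q.1 q.2.1).keys
        = "count" :: "post_key" :: KL.filter linkPred := by
    intro q
    show (buildPost (PySem.Dict.mk q.2.2) KL q.1 q.2.1).items.map (·.1) = _
    rw [buildPost_items _ _ _ _ hnd hc hp]
    simp [Function.comp_def]
  simp only [dict_as_htmlP, List.map_cons, List.head?_cons, Option.getD_some, hkeys0]
  rw [foldl_append_join]
  rw [html_table_wrap, String.empty_append, sjoin_cons, List.map_cons, List.map_map]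
  congr 2
  congr 1
  · rw [wrap_multipleP_td, tr_wrap]
    rfl
  · congr 1
    congr 1
    · rw [valuesA (PySem.Dict.mk e.2.2) KL hnd hc hp e.1 e.2.1, wrap_multipleP_td, tr_wrap]
      rfl
    · apply List.map_congr_left
      intro q _
      simp only [Function.comp_def]
      rw [valuesA (PySem.Dict.mk q.2.2) KL hnd hc hp q.1 q.2.1, wrap_multipleP_td, tr_wrap]
      rfl

-- ===== VERDICT (by name: the statement is the Claim_ definition above) =====
theorem dict_with_key_as_html_spec : Claim_equal_dict_with_key_as_html := by
  intro tdl debug _ hpre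
  obtain ⟨hne, hnd, hinner, hcount, hpost⟩ := hpre
  unfold Spec_dict_with_key_as_html
  cases tdl with
  | nil => exact absurd rfl hne
  | cons t rest =>
    have hKLnd : (t.2.map (·.1)).Nodup := hinner t List.mem_cons_self
    have hcKL : "count" ∉ t.2.map (·.1) := by simpa using hcount
    have hpKL : "post_key" ∉ t.2.map (·.1) := by simpa using hpost
    have hlook : (PySem.Dict.mk (t :: rest)).getD t.1 [] = t.2 :=
      dict_lookup (t :: rest) hnd t List.mem_cons_self
    -- evaluate B
    have hB : dict_with_key_as_html_alt (t :: rest) debug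
        = "<html><table>" ++
          String.join (tdRow ("count" :: "post_key" :: (t.2.map (·.1)).filter linkPred) ::
            (PySem.List.enumerate (t :: rest) 1).map (fun q =>
              tdRow ([PySem.Int.toStr q.1, q.2.1] ++
                ((t.2.map (·.1)).filter linkPred).map (cellOf (PySem.Dict.mk q.2.2))))) ++
          "</table></html>" := by
      simp only [dict_with_key_as_html_alt, List.map_cons, List.getElem?_cons_zero, hlook]
      rfl
    -- evaluate A's main loop
    have h1 : (((t :: rest).map (·.1)).foldl (stepA (t :: rest)) ([], true, [], 1))
        = (rest.map (·.1)).foldl (stepA (t :: rest))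
            ([buildPost (PySem.Dict.mk t.2) (t.2.map (·.1)) 1 t.1], false,
             t.2.map (·.1), 2) := by
      rw [List.map_cons, List.foldl_cons]
      simp only [stepA, hlook]
      rfl
    have h2 := enum_keys (t :: rest) hnd (t.2.map (·.1)) rest
      (fun q hq => List.mem_cons_of_mem _ hq) 2
    show dict_as_htmlP ((((t :: rest).map (·.1)).foldl (stepA (t :: rest))
        ([], true, [], 1)).1) debug = _
    rw [h1, foldA_tail]
    show dict_as_htmlP ([buildPost (PySem.Dict.mk t.2) (t.2.map (·.1)) 1 t.1] ++
        (PySem.List.enumerate (rest.map (·.1)) 2).map (fun p =>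
          buildPost (PySem.Dict.mk ((PySem.Dict.mk (t :: rest)).getD p.2 []))
            (t.2.map (·.1)) p.1 p.2)) debug = _
    rw [h2]
    rw [show [buildPost (PySem.Dict.mk t.2) (t.2.map (·.1)) 1 t.1] ++
        (PySem.List.enumerate rest 2).map (fun q =>
          buildPost (PySem.Dict.mk q.2.2) (t.2.map (·.1)) q.1 q.2.1)
        = (((1 : Int), t) :: PySem.List.enumerate rest 2).map (fun q =>
          buildPost (PySem.Dict.mk q.2.2) (t.2.map (·.1)) q.1 q.2.1) from by
      rw [List.map_cons]; rfl]
    rw [A_render (t.2.map (·.1)) hKLnd hcKL hpKL ((1 : Int), t)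
      (PySem.List.enumerate rest 2) debug, hB]
    rw [show PySem.List.enumerate (t :: rest) 1 = ((1 : Int), t) :: PySem.List.enumerate rest 2
      from PySem.List.enumerate_cons ..]
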